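-- pv_equiv track=rewrite | github.com/herneri/share-vid | video.py | parse_video_name
-- ===== SOURCE A (Python) =====
-- delimiter = '_'
--
-- def to_string(array):
--     string = ""
--
--     for char in array:
--         string += char
--
--     return string
--
-- def format_video_name(name, delimiter):
--     new_name = ""
--
--     for char in name:
--         if char == delimiter:
--             new_name += " "
--             continue
--
--         new_name += char
--
--     return new_name
--
-- def parse_video_name(video_name):
-- 	name = None
-- 	extension = None
-- 	year = None
-- 	path = video_name
--
-- 	# Ignore delimiter while finding extension and year,
-- 	# once found collect it when getting the video name
-- 	ignore_delimiter = True
-- 	buffer = []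
--
-- 	i = len(video_name) - 1
-- 	while i >= 0:
-- 		if ignore_delimiter == True and (video_name[i] == '.' or video_name[i] == delimiter):
-- 			if extension == None:
-- 				extension = to_string(buffer)
-- 			elif year == None:
-- 				year = to_string(buffer)
-- 				ignore_delimiter = False
--
-- 			buffer = []
-- 			i -= 1
-- 			continue
-- 		# The video name ends here and
-- 		# the path starts, all data is collected
-- 		elif video_name[i] == '/':
-- 			if name == None:
-- 				name = format_video_name(to_string(buffer), delimiter)
-- 				break
--
-- 		buffer.insert(0, video_name[i])
-- 		i -= 1
--
-- 	return name, extension, year, path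
-- ===== SOURCE B (Python) =====
-- # B: instead of A's char-by-char backward walk with front-insert buffers and
-- # incremental string building, find the split points with rfind and slice once.
-- def parse_video_name(video_name):
--     path = video_name
--     slash = video_name.rfind('/')
--     tail = video_name[slash + 1:]
--     j1 = max(tail.rfind('.'), tail.rfind('_'))
--     if j1 == -1:
--         extension = None
--         year = None
--         rest = tail
--     else:
--         extension = tail[j1 + 1:]
--         head = tail[:j1]
--         j2 = max(head.rfind('.'), head.rfind('_'))
--         if j2 == -1:
--             year = None
--             rest = head
--         else:
--             year = head[j2 + 1:]
--             rest = head[:j2]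
--     name = rest.replace('_', ' ') if slash != -1 else None
--     return name, extension, year, path
-- ===== Notes on version B (the rewrite author's own statement) =====
-- stated objective: faster
-- what changed: Replaced the backward character-by-character state machine with front-insert buffers and incremental string concatenation by locating the last '/' and the last two '.'/'_' delimiters with rfind and extracting the four fields with string slicing and one replace.
import Mathlib
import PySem

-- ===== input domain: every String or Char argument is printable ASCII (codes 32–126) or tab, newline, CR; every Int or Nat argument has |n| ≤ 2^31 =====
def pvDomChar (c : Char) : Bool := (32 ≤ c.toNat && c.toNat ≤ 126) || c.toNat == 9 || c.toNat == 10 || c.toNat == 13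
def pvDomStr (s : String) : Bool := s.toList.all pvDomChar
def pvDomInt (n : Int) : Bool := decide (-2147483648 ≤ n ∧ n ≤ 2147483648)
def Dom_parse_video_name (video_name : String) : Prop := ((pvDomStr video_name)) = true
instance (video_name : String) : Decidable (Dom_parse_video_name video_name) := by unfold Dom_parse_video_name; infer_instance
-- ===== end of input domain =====

-- B replaces A's backward char-by-char state machine (front-insert buffers, incremental
-- string concatenation) by rfind + slicing; equal return value on every input.

-- ===== PORT A =====
-- to_string(array): string += char over the buffer
def pvToString (array : List Char) : String :=
  array.foldl (fun s c => s.push c) ""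

-- format_video_name(name, delimiter)
def pvFormatVideoName (name : String) (delim : Char) : String :=
  name.toList.foldl (fun acc c => if c = delim then acc ++ " " else acc.push c) ""

-- the backward while-loop of A: i runs from len-1 down to 0, rendered as structural
-- recursion over the reversed character list; state = (name, extension, year,
-- ignore_delimiter, buffer); buffer.insert(0, ch) = ch :: buf
def pvLoop : List Char → Option String → Option String → Option String → Bool → List Char →
    Option String × Option String × Option String
  | [], name, ext, year, _, _ => (name, ext, year)
  | c :: rest, name, ext, year, ign, buf =>
    if ign = true ∧ (c = '.' ∨ c = '_') then
      if ext = none then pvLoop rest name (some (pvToString buf)) year ign []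
      else if year = none then pvLoop rest name ext (some (pvToString buf)) false []
      else pvLoop rest name ext year ign []
    else if c = '/' ∧ name = none then
      (some (pvFormatVideoName (pvToString buf) '_'), ext, year)
    else
      pvLoop rest name ext year ign (c :: buf)

def parse_video_name (video_name : String) : Option String × Option String × Option String × String :=
  let r := pvLoop video_name.toList.reverse none none none true []
  (r.1, r.2.1, r.2.2, video_name)

-- ===== PORT B =====
def parse_video_name_alt (video_name : String) : Option String × Option String × Option String × String :=
  let path := video_name
  let slash := PySem.Str.rfind video_name "/"
  let tail := PySem.Str.slice video_name (some (slash + 1)) none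
  let j1 := max (PySem.Str.rfind tail ".") (PySem.Str.rfind tail "_")
  if j1 = -1 then
    let rest := tail
    let name := if slash ≠ -1 then some (PySem.Str.replace rest "_" " ") else none
    (name, none, none, path)
  else
    let extension := PySem.Str.slice tail (some (j1 + 1)) none
    let head := PySem.Str.slice tail none (some j1)
    let j2 := max (PySem.Str.rfind head ".") (PySem.Str.rfind head "_")
    if j2 = -1 then
      let rest := head
      let name := if slash ≠ -1 then some (PySem.Str.replace rest "_" " ") else none
      (name, some extension, none, path)
    else
      let year := PySem.Str.slice head (some (j2 + 1)) none
      let rest := PySem.Str.slice head none (some j2)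
      let name := if slash ≠ -1 then some (PySem.Str.replace rest "_" " ") else none
      (name, some extension, some year, path)

-- ===== PRECONDITION & SPEC =====
def Spec_parse_video_name (video_name : String) (out : Option String × Option String × Option String × String) : Prop := out = parse_video_name_alt video_name
instance (video_name : String) (out : Option String × Option String × Option String × String) : Decidable (Spec_parse_video_name video_name out) := by unfold Spec_parse_video_name; infer_instance

-- ===== CLAIM (what is proved, stated in full; the proofs are below) =====
def Claim_equal_parse_video_name : Prop := ∀ (video_name : String), Dom_parse_video_name video_name → Spec_parse_video_name video_name (parse_video_name video_name)

-- ===== LEMMAS AND PROOFS =====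

-- character predicates: pvNd = not a delimiter ('.'/'_'), pvNs = not a slash, pvOk = neither
def pvNd (c : Char) : Bool := c != '.' && c != '_'
def pvNs (c : Char) : Bool := c != '/'
def pvOk (c : Char) : Bool := pvNd c && pvNs c
def pvSub (c : Char) : Char := if c = '_' then ' ' else c
def pvMkName (t : List Char) : String := String.ofList (t.reverse.map pvSub)

-- common shape of the result, over the REVERSED character list
def pvSpec (rcs : List Char) : Option String × Option String × Option String :=
  match rcs.dropWhile pvOk with
  | [] => (none, none, none)
  | c :: r1 =>
    if c = '/' then (some (pvMkName (rcs.takeWhile pvOk)), none, none)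
    else
      let e := some (String.ofList (rcs.takeWhile pvOk).reverse)
      match r1.dropWhile pvOk with
      | [] => (none, e, none)
      | d :: r2 =>
        if d = '/' then (some (pvMkName (r1.takeWhile pvOk)), e, none)
        else
          let y := some (String.ofList (r1.takeWhile pvOk).reverse)
          match r2.dropWhile pvNs with
          | [] => (none, e, y)
          | _ :: _ => (some (pvMkName (r2.takeWhile pvNs)), e, y)

-- ---- string plumbing ----
lemma toList_foldl_push (l : List Char) (s : String) :
    (l.foldl (fun a c => a.push c) s).toList = s.toList ++ l := by
  induction l generalizing s with
  | nil => simp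
  | cons c t ih => simp [List.foldl_cons, ih]

lemma toList_pvToString (l : List Char) : (pvToString l).toList = l := by
  simp [pvToString, toList_foldl_push]

lemma toList_foldl_fmt (l : List Char) (s : String) :
    (l.foldl (fun acc c => if c = '_' then acc ++ " " else acc.push c) s).toList
      = s.toList ++ l.map pvSub := by
  induction l generalizing s with
  | nil => simp
  | cons c t ih =>
    by_cases hc : c = '_' <;> simp [List.foldl_cons, hc, ih, pvSub]

lemma toList_pvFormat (s : String) :
    (pvFormatVideoName s '_').toList = s.toList.map pvSub := by
  simp [pvFormatVideoName, toList_foldl_fmt]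

lemma pvFormat_toString (t : List Char) :
    pvFormatVideoName (pvToString t.reverse) '_' = pvMkName t := by
  apply String.ext
  simp [toList_pvFormat, toList_pvToString, pvMkName, String.toList_ofList]

lemma pvFormat_ofList (t : List Char) :
    pvFormatVideoName (String.ofList t.reverse) '_' = pvMkName t := by
  apply String.ext
  simp [toList_pvFormat, pvMkName, String.toList_ofList]

lemma pvToString_mk (t : List Char) : pvToString t = String.ofList t := by
  apply String.ext; simp [toList_pvToString, String.toList_ofList]

-- ---- A-side loop characterisation, phase by phase ----
lemma pvLoop_phase3 (rcs : List Char) (e y : Option String) (buf : List Char) :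
    pvLoop rcs none e y false buf =
      match rcs.dropWhile pvNs with
      | [] => (none, e, y)
      | _ :: _ => (some (pvFormatVideoName (pvToString ((rcs.takeWhile pvNs).reverse ++ buf)) '_'), e, y) := by
  induction rcs generalizing buf with
  | nil => simp [pvLoop]
  | cons c rest ih =>
    by_cases hc : c = '/'
    · simp [pvLoop, hc, List.dropWhile_cons, List.takeWhile_cons, pvNs]
    · simp [pvLoop, hc, List.dropWhile_cons, List.takeWhile_cons, pvNs, ih]

lemma pvLoop_phase2 (rcs : List Char) (s : String) (buf : List Char) :
    pvLoop rcs none (some s) none true buf =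
      match rcs.dropWhile pvOk with
      | [] => (none, some s, none)
      | c :: r1 =>
        if c = '/' then
          (some (pvFormatVideoName (pvToString ((rcs.takeWhile pvOk).reverse ++ buf)) '_'), some s, none)
        else
          pvLoop r1 none (some s) (some (pvToString ((rcs.takeWhile pvOk).reverse ++ buf))) false []
      := by
  induction rcs generalizing buf with
  | nil => simp [pvLoop]
  | cons c rest ih =>
    by_cases hd : c = '.' ∨ c = '_'
    · have hok : pvOk c = false := by
        rcases hd with h | h <;> simp [pvOk, pvNd, h]
      simp [pvLoop, hd, List.dropWhile_cons, hok]
      rcases hd with h | h <;> simp [h]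
    · by_cases hc : c = '/'
      · subst hc
        simp [pvLoop, pvOk, pvNd, pvNs, List.dropWhile_cons, List.takeWhile_cons]
      · have hok : pvOk c = true := by
          simp [pvOk, pvNd, pvNs]
          push_neg at hd
          exact ⟨⟨hd.1, hd.2⟩, hc⟩
        simp [pvLoop, hd, hc, List.dropWhile_cons, hok, List.takeWhile_cons, ih]

lemma pvLoop_phase1 (rcs : List Char) (buf : List Char) :
    pvLoop rcs none none none true buf =
      match rcs.dropWhile pvOk with
      | [] => (none, none, none)
      | c :: r1 =>
        if c = '/' then
          (some (pvFormatVideoName (pvToString ((rcs.takeWhile pvOk).reverse ++ buf)) '_'), none, none)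
        else
          pvLoop r1 none (some (pvToString ((rcs.takeWhile pvOk).reverse ++ buf))) none true []
      := by
  induction rcs generalizing buf with
  | nil => simp [pvLoop]
  | cons c rest ih =>
    by_cases hd : c = '.' ∨ c = '_'
    · have hok : pvOk c = false := by
        rcases hd with h | h <;> simp [pvOk, pvNd, h]
      simp [pvLoop, hd, List.dropWhile_cons, hok]
      rcases hd with h | h <;> simp [h]
    · by_cases hc : c = '/'
      · subst hc
        simp [pvLoop, pvOk, pvNd, pvNs, List.dropWhile_cons, List.takeWhile_cons]
      · have hok : pvOk c = true := by
          simp [pvOk, pvNd, pvNs]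
          push_neg at hd
          exact ⟨⟨hd.1, hd.2⟩, hc⟩
        simp [pvLoop, hd, hc, List.dropWhile_cons, hok, List.takeWhile_cons, ih]

-- A's loop computes pvSpec
lemma pvLoop_eq_pvSpec (rcs : List Char) :
    pvLoop rcs none none none true [] = pvSpec rcs := by
  rw [pvLoop_phase1]
  unfold pvSpec
  cases h1 : rcs.dropWhile pvOk with
  | nil => simp
  | cons c r1 =>
    by_cases hc : c = '/'
    · simp [hc, List.append_nil, pvFormat_toString]
    · simp only [hc, if_false]
      rw [pvLoop_phase2]
      simp only [List.append_nil, pvToString_mk]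
      cases h2 : r1.dropWhile pvOk with
      | nil => simp
      | cons d r2 =>
        by_cases hd : d = '/'
        · simp [hd, List.append_nil, pvFormat_toString, pvFormat_ofList]
        · simp only [hd, if_false]
          rw [pvLoop_phase3]
          cases h3 : r2.dropWhile pvNs with
          | nil => simp
          | cons e r3 => simp [List.append_nil, pvFormat_toString]

-- ---- B-side characterisation ----
lemma pvGo_succ (s sub : List Char) (j : Nat) :
    PySem.Chars.rfind.go s sub (j + 1) =
      if sub.isPrefixOf (s.drop (j + 1)) then ((j + 1 : Nat) : Int)
      else PySem.Chars.rfind.go s sub j := by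
  simp [PySem.Chars.rfind.go]

lemma pvGo_zero (s sub : List Char) :
    PySem.Chars.rfind.go s sub 0 = if sub.isPrefixOf s then 0 else -1 := by
  simp [PySem.Chars.rfind.go]

lemma pvPrefix_single_false (c : Char) (l : List Char) (h : ∀ x ∈ l, x ≠ c) :
    [c].isPrefixOf l = false := by
  cases l with
  | nil => simp [List.isPrefixOf]
  | cons x l' =>
    simp [List.isPrefixOf]
    intro h'
    exact absurd h'.symm (h x (by simp))

lemma pvGo_stable (s : List Char) (c : Char) (j d : Nat)
    (h : ∀ i, j < i → [c].isPrefixOf (s.drop i) = false) :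
    PySem.Chars.rfind.go s [c] (j + d) = PySem.Chars.rfind.go s [c] j := by
  induction d with
  | zero => rfl
  | succ d ih =>
    rw [show j + (d + 1) = (j + d) + 1 by omega, pvGo_succ, h _ (by omega)]
    simpa using ih

lemma pvGo_none (s : List Char) (c : Char) (k : Nat)
    (h : ∀ i, [c].isPrefixOf (s.drop i) = false) :
    PySem.Chars.rfind.go s [c] k = -1 := by
  induction k with
  | zero => rw [pvGo_zero, show [c].isPrefixOf s = false from by simpa using h 0]; simp
  | succ k ih => rw [pvGo_succ, h]; simpa using ih

lemma pvRfind_single (cs : List Char) (c : Char) :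
    PySem.Chars.rfind cs [c] =
      (cs.length : Int) - 1 - ((cs.reverse.takeWhile (fun x => x != c)).length : Int) := by
  have hsplit : cs.reverse.takeWhile (fun x => x != c) ++ cs.reverse.dropWhile (fun x => x != c)
      = cs.reverse := List.takeWhile_append_dropWhile
  have htw : ∀ x ∈ cs.reverse.takeWhile (fun x => x != c), x ≠ c := by
    intro x hx
    have := List.mem_takeWhile_imp hx
    simpa using this
  show PySem.Chars.rfind.go cs [c] cs.length = _
  cases hr : cs.reverse.dropWhile (fun x => x != c) with
  | nil =>
    have hall : cs.reverse.takeWhile (fun x => x != c) = cs.reverse := by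
      rw [hr, List.append_nil] at hsplit
      exact hsplit
    have hnone : ∀ i, [c].isPrefixOf (cs.drop i) = false := by
      intro i
      apply pvPrefix_single_false
      intro x hx
      have hxcs : x ∈ cs := List.mem_of_mem_drop hx
      exact htw x (by rw [hall]; simpa using hxcs)
    rw [pvGo_none cs c cs.length hnone]
    have hlen : (cs.reverse.takeWhile (fun x => x != c)).length = cs.length := by
      rw [hall]; simp
    rw [hlen]
    omega
  | cons e r' =>
    have he : e = c := by
      have hne := List.head_dropWhile_not (fun x => x != c) (l := cs.reverse) (by rw [hr]; simp)
      simp [hr] at hne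
      exact hne
    subst he
    have hcs : cs = r'.reverse ++ e :: (cs.reverse.takeWhile (fun x => x != e)).reverse := by
      conv_lhs => rw [← List.reverse_reverse cs, ← hsplit, hr]
      simp
    set t := cs.reverse.takeWhile (fun x => x != e) with ht
    have hlen : cs.length = r'.length + 1 + t.length := by
      rw [hcs]; simp; omega
    have hgt : ∀ i, r'.length < i → [e].isPrefixOf (cs.drop i) = false := by
      intro i hi
      apply pvPrefix_single_false
      intro x hx
      rw [hcs] at hx
      have hx' := List.mem_of_mem_drop hx
      rw [List.drop_append] at hx
      have h1 : r'.reverse.drop i = [] := by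
        apply List.drop_eq_nil_of_le; simpa using Nat.le_of_lt hi
      rw [h1, List.nil_append] at hx
      have h2 : i - r'.reverse.length ≠ 0 := by simp; omega
      cases hd : i - r'.reverse.length with
      | zero => exact absurd hd h2
      | succ k =>
        rw [hd, List.drop_succ_cons] at hx
        have hxt : x ∈ (cs.reverse.takeWhile (fun x => x != e)).reverse :=
          List.mem_of_mem_drop hx
        exact htw x (by simpa using hxt)
    have hat : [e].isPrefixOf (cs.drop r'.length) = true := by
      rw [hcs, List.drop_append]
      have h1 : r'.reverse.drop r'.length = [] := by
        apply List.drop_eq_nil_of_le; simp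
      have h2 : r'.length - r'.reverse.length = 0 := by simp
      rw [h1, h2, List.nil_append, List.drop_zero]
      simp [List.isPrefixOf]
    have hstep : PySem.Chars.rfind.go cs [e] r'.length = (r'.length : Int) := by
      cases hk : r'.length with
      | zero =>
        have hat0 : [e].isPrefixOf cs = true := by
          rw [← List.drop_zero (l := cs), ← hk]; exact hat
        rw [pvGo_zero, hat0]
        simp
      | succ k =>
        have hat' : [e].isPrefixOf (cs.drop (k + 1)) = true := by
          rw [← hk]; exact hat
        rw [pvGo_succ, hat']
        simp
    have hfin : cs.length = r'.length + (t.length + 1) := by omega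
    rw [hfin, pvGo_stable cs e r'.length (t.length + 1) hgt, hstep]
    omega

lemma pvTakeWhile_and_length {α : Type} (p q : α → Bool) (l : List α) :
    (l.takeWhile (fun c => p c && q c)).length
      = min (l.takeWhile p).length (l.takeWhile q).length := by
  induction l with
  | nil => simp
  | cons c t ih =>
    by_cases hp : p c <;> by_cases hq : q c <;>
      simp [List.takeWhile_cons, hp, hq, ih, Nat.succ_min_succ]

lemma pvRfind_delims (w : List Char) :
    max (PySem.Chars.rfind w ['.']) (PySem.Chars.rfind w ['_'])
      = (w.length : Int) - 1 - ((w.reverse.takeWhile pvNd).length : Int) := by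
  have h1 := pvRfind_single w '.'
  have h2 := pvRfind_single w '_'
  have h3 := pvTakeWhile_and_length (fun x => x != '.') (fun x => x != '_') w.reverse
  have hnd : w.reverse.takeWhile pvNd
      = w.reverse.takeWhile (fun c => (fun x => x != '.') c && (fun x => x != '_') c) := rfl
  have hle1 : (w.reverse.takeWhile (fun x => x != '.')).length ≤ w.length := by
    simpa using List.Sublist.length_le (List.takeWhile_sublist (fun x => x != '.') (l := w.reverse))
  have hle2 : (w.reverse.takeWhile (fun x => x != '_')).length ≤ w.length := by
    simpa using List.Sublist.length_le (List.takeWhile_sublist (fun x => x != '_') (l := w.reverse))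
  rw [h1, h2, hnd, h3]
  omega

lemma pvReplaceGo_single (c d : Char) (l : List Char) :
    ∀ (fuel : Nat) (acc : List Char), l.length ≤ fuel →
      PySem.Chars.replace.go [c] [d] fuel l acc
        = acc.reverse ++ l.map (fun x => if x = c then d else x) := by
  induction l with
  | nil => intro fuel acc _; cases fuel <;> simp [PySem.Chars.replace.go]
  | cons x t ih =>
    intro fuel acc hf
    cases fuel with
    | zero => simp at hf
    | succ f =>
      by_cases hx : x = c
      · subst hx
        have hpre : [x].isPrefixOf (x :: t) = true := by simp [List.isPrefixOf]
        simp only [PySem.Chars.replace.go, hpre, if_true]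
        rw [show List.drop [x].length (x :: t) = t from by simp]
        rw [ih f _ (by simpa using hf)]
        simp
      · have hpre : [c].isPrefixOf (x :: t) = false := by
          simp [List.isPrefixOf]
          intro h'; exact hx h'.symm
        simp only [PySem.Chars.replace.go, hpre, Bool.false_eq_true, if_false]
        rw [ih f _ (by simpa using hf)]
        simp [hx]

lemma pvReplace_single (l : List Char) (c d : Char) :
    (PySem.Chars.replace l [c] [d]) = l.map (fun x => if x = c then d else x) := by
  have := pvReplaceGo_single c d l l.length [] (le_refl _)
  simpa [PySem.Chars.replace] using this

lemma toList_strReplace (s : String) :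
    (PySem.Str.replace s "_" " ").toList = s.toList.map pvSub := by
  have h : ("_" : String).toList = ['_'] := by decide
  have h2 : (" " : String).toList = [' '] := by decide
  rw [PySem.Str.toList_replace, h, h2, pvReplace_single]
  rfl

-- helpers about takeWhile/dropWhile across appends
lemma pvTakeWhile_append_neg {α : Type} (p : α → Bool) (l1 l2 : List α) (c : α)
    (h : p c = false) : (l1 ++ c :: l2).takeWhile p = l1.takeWhile p := by
  induction l1 with
  | nil => simp [List.takeWhile_cons, h]
  | cons a t ih => by_cases ha : p a <;> simp [List.takeWhile_cons, ha, ih]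

lemma pvDropWhile_append_neg {α : Type} (p : α → Bool) (l1 l2 : List α) (c : α)
    (h : p c = false) : (l1 ++ c :: l2).dropWhile p = l1.dropWhile p ++ c :: l2 := by
  induction l1 with
  | nil => simp [List.dropWhile_cons, h]
  | cons a t ih => by_cases ha : p a <;> simp [List.dropWhile_cons, ha, ih]

lemma pvTakeWhile_and_of_all {α : Type} (p q : α → Bool) (l : List α)
    (h : ∀ x ∈ l, q x = true) :
    l.takeWhile (fun c => p c && q c) = l.takeWhile p := by
  induction l with
  | nil => simp
  | cons a t ih =>
    have ha := h a (by simp)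
    by_cases hp : p a <;>
      simp [List.takeWhile_cons, hp, ha, ih fun x hx => h x (by simp [hx])]

lemma pvDropWhile_and_of_all {α : Type} (p q : α → Bool) (l : List α)
    (h : ∀ x ∈ l, q x = true) :
    l.dropWhile (fun c => p c && q c) = l.dropWhile p := by
  induction l with
  | nil => simp
  | cons a t ih =>
    have ha := h a (by simp)
    by_cases hp : p a <;>
      simp [List.dropWhile_cons, hp, ha, ih fun x hx => h x (by simp [hx])]

-- small takeWhile/dropWhile structure facts
lemma pvTakeWhile_eq_self {α : Type} (p : α → Bool) (l : List α)
    (h : l.dropWhile p = []) : l.takeWhile p = l := by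
  have h2 := List.takeWhile_append_dropWhile (p := p) (l := l)
  rw [h, List.append_nil] at h2
  exact h2

lemma pvSplit_dropWhile {α : Type} (p : α → Bool) (l : List α) (c : α) (r : List α)
    (h : l.dropWhile p = c :: r) : l = l.takeWhile p ++ c :: r := by
  conv_lhs => rw [← List.takeWhile_append_dropWhile (p := p) (l := l)]
  rw [h]

lemma pvHead_dropWhile {α : Type} (p : α → Bool) (l : List α) (c : α) (r : List α)
    (h : l.dropWhile p = c :: r) : p c = false := by
  have h2 := List.head_dropWhile_not p (l := l) (by rw [h]; simp)
  simpa [h] using h2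

lemma pvMem_dropWhile {α : Type} (p : α → Bool) (l : List α) (c : α) (r : List α)
    (h : l.dropWhile p = c :: r) : ∀ x ∈ c :: r, x ∈ l := by
  intro x hx
  exact (List.dropWhile_sublist p).subset (h ▸ hx)

lemma pvRev_decomp {α : Type} (a b : List α) (c : α) :
    (a ++ c :: b).reverse = b.reverse ++ c :: a.reverse := by
  simp

lemma pvDrop_at {α : Type} (a b : List α) (c : α) :
    (b.reverse ++ c :: a.reverse).drop (b.length + 1) = a.reverse := by
  rw [List.drop_append]
  simp

lemma pvTake_at {α : Type} (a b : List α) (c : α) :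
    (b.reverse ++ c :: a.reverse).take b.length = b.reverse := by
  rw [List.take_append]
  simp

-- the common result shape over the slash-free segment w (in right-to-left order);
-- the flag says whether a '/' was found
def pvSpecW (w : List Char) (slash : Bool) :
    Option String × Option String × Option String :=
  match w.dropWhile pvNd with
  | [] => (if slash then some (pvMkName w) else none, none, none)
  | _ :: u1 =>
    let e := some (String.ofList (w.takeWhile pvNd).reverse)
    match u1.dropWhile pvNd with
    | [] => (if slash then some (pvMkName u1) else none, e, none)
    | _ :: u2 =>
      let y := some (String.ofList (u1.takeWhile pvNd).reverse)
      (if slash then some (pvMkName u2) else none, e, y)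

-- pvSpec on (w ++ rest) with w slash-free and rest empty or starting with '/'
lemma pvSpec_decomp (w rest : List Char) (hw : ∀ x ∈ w, pvNs x = true)
    (hrest : rest = [] ∨ ∃ rs, rest = '/' :: rs) :
    pvSpec (w ++ rest) = pvSpecW w (!rest.isEmpty) := by
  have hOk : ∀ (l : List Char), (∀ x ∈ l, pvNs x = true) →
      l.takeWhile pvOk = l.takeWhile pvNd ∧ l.dropWhile pvOk = l.dropWhile pvNd := by
    intro l hl
    exact ⟨pvTakeWhile_and_of_all pvNd pvNs l hl, pvDropWhile_and_of_all pvNd pvNs l hl⟩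
  have hOkTake : ∀ (l rs : List Char), (∀ x ∈ l, pvNs x = true) →
      (l ++ '/' :: rs).takeWhile pvOk = l.takeWhile pvNd := by
    intro l rs hl
    rw [pvTakeWhile_append_neg pvOk l rs '/' (by simp [pvOk, pvNs])]
    exact (hOk l hl).1
  have hOkDrop : ∀ (l rs : List Char), (∀ x ∈ l, pvNs x = true) →
      (l ++ '/' :: rs).dropWhile pvOk = l.dropWhile pvNd ++ '/' :: rs := by
    intro l rs hl
    rw [pvDropWhile_append_neg pvOk l rs '/' (by simp [pvOk, pvNs])]
    rw [(hOk l hl).2]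
  rcases hrest with hrest | ⟨rs, hrest⟩
  · subst hrest
    rw [List.append_nil]
    unfold pvSpec pvSpecW
    cases hu1 : w.dropWhile pvNd with
    | nil => simp [(hOk w hw).1, (hOk w hw).2, hu1]
    | cons c u1 =>
      have hu1mem : ∀ x ∈ u1, pvNs x = true := by
        intro x hx
        exact hw x (pvMem_dropWhile pvNd w c u1 hu1 x (by simp [hx]))
      have hcslash : ¬ c = '/' := by
        have := hw c (pvMem_dropWhile pvNd w c u1 hu1 c (by simp))
        simp [pvNs] at this
        exact this
      cases hu2 : u1.dropWhile pvNd with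
      | nil =>
        simp [(hOk w hw).1, (hOk w hw).2, (hOk u1 hu1mem).1, (hOk u1 hu1mem).2, hu1, hu2,
          hcslash]
      | cons d u2 =>
        have hu2mem : ∀ x ∈ u2, pvNs x = true := by
          intro x hx
          exact hu1mem x (pvMem_dropWhile pvNd u1 d u2 hu2 x (by simp [hx]))
        have hdslash : ¬ d = '/' := by
          have := hu1mem d (pvMem_dropWhile pvNd u1 d u2 hu2 d (by simp))
          simp [pvNs] at this
          exact this
        have hu2drop : u2.dropWhile pvNs = [] := by
          rw [List.dropWhile_eq_nil_iff]
          intro x hx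
          simp [hu2mem x hx]
        simp [(hOk w hw).1, (hOk w hw).2, (hOk u1 hu1mem).1, (hOk u1 hu1mem).2, hu1, hu2,
          hcslash, hdslash, hu2drop]
  · subst hrest
    unfold pvSpec pvSpecW
    cases hu1 : w.dropWhile pvNd with
    | nil =>
      simp [hOkTake w rs hw, hOkDrop w rs hw, hu1, pvTakeWhile_eq_self pvNd w hu1]
    | cons c u1 =>
      have hu1mem : ∀ x ∈ u1, pvNs x = true := by
        intro x hx
        exact hw x (pvMem_dropWhile pvNd w c u1 hu1 x (by simp [hx]))
      have hcslash : ¬ c = '/' := by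
        have := hw c (pvMem_dropWhile pvNd w c u1 hu1 c (by simp))
        simp [pvNs] at this
        exact this
      cases hu2 : u1.dropWhile pvNd with
      | nil =>
        simp [hOkTake w rs hw, hOkDrop w rs hw, hOkTake u1 rs hu1mem, hOkDrop u1 rs hu1mem,
          hu1, hu2, hcslash, pvTakeWhile_eq_self pvNd u1 hu2]
      | cons d u2 =>
        have hu2mem : ∀ x ∈ u2, pvNs x = true := by
          intro x hx
          exact hu1mem x (pvMem_dropWhile pvNd u1 d u2 hu2 x (by simp [hx]))
        have hdslash : ¬ d = '/' := by
          have := hu1mem d (pvMem_dropWhile pvNd u1 d u2 hu2 d (by simp))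
          simp [pvNs] at this
          exact this
        have hu2take : (u2 ++ '/' :: rs).takeWhile pvNs = u2 := by
          rw [pvTakeWhile_append_neg pvNs u2 rs '/' (by simp [pvNs])]
          exact pvTakeWhile_eq_self pvNs u2 (by
            rw [List.dropWhile_eq_nil_iff]
            intro x hx
            simp [hu2mem x hx])
        have hu2drop : (u2 ++ '/' :: rs).dropWhile pvNs = '/' :: rs := by
          rw [pvDropWhile_append_neg pvNs u2 rs '/' (by simp [pvNs])]
          have h0 : u2.dropWhile pvNs = [] := by
            rw [List.dropWhile_eq_nil_iff]
            intro x hx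
            simp [hu2mem x hx]
          rw [h0, List.nil_append]
        simp [hOkTake w rs hw, hOkDrop w rs hw, hOkTake u1 rs hu1mem, hOkDrop u1 rs hu1mem,
          hu1, hu2, hcslash, hdslash, hu2take, hu2drop]

-- the body of B after slash and tail are computed
def pvInner (tail : String) (slash : Int) (path : String) :
    Option String × Option String × Option String × String :=
  let j1 := max (PySem.Str.rfind tail ".") (PySem.Str.rfind tail "_")
  if j1 = -1 then
    let rest := tail
    let name := if slash ≠ -1 then some (PySem.Str.replace rest "_" " ") else none
    (name, none, none, path)
  else
    let extension := PySem.Str.slice tail (some (j1 + 1)) none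
    let head := PySem.Str.slice tail none (some j1)
    let j2 := max (PySem.Str.rfind head ".") (PySem.Str.rfind head "_")
    if j2 = -1 then
      let rest := head
      let name := if slash ≠ -1 then some (PySem.Str.replace rest "_" " ") else none
      (name, some extension, none, path)
    else
      let year := PySem.Str.slice head (some (j2 + 1)) none
      let rest := PySem.Str.slice head none (some j2)
      let name := if slash ≠ -1 then some (PySem.Str.replace rest "_" " ") else none
      (name, some extension, some year, path)

lemma pvAlt_def (v : String) :
    parse_video_name_alt v =
      pvInner (PySem.Str.slice v (some (PySem.Str.rfind v "/" + 1)) none)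
        (PySem.Str.rfind v "/") v := rfl

lemma pvRfind_delims_str (t : String) :
    max (PySem.Str.rfind t ".") (PySem.Str.rfind t "_")
      = (t.toList.length : Int) - 1 - ((t.toList.reverse.takeWhile pvNd).length : Int) := by
  rw [PySem.Str.rfind_eq, PySem.Str.rfind_eq]
  rw [show ("." : String).toList = ['.'] from rfl, show ("_" : String).toList = ['_'] from rfl]
  exact pvRfind_delims t.toList

lemma pvSliceFrom_toList (t : String) (n : Nat) :
    (PySem.Str.slice t (some ((n : Int) + 1)) none).toList = t.toList.drop (n + 1) := by
  have h : ((n : Int) + 1) = ((n + 1 : Nat) : Int) := by push_cast; ring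
  rw [PySem.Str.toList_slice, PySem.Chars.slice_eq_listSlice, h, PySem.List.slice_from_natCast]

lemma pvSliceTo_toList (t : String) (n : Nat) :
    (PySem.Str.slice t none (some (n : Int))).toList = t.toList.take n := by
  rw [PySem.Str.toList_slice, PySem.Chars.slice_eq_listSlice, PySem.List.slice_to_natCast]

lemma pvReplaceName (t : String) (w : List Char) (hw : t.toList = w.reverse) :
    PySem.Str.replace t "_" " " = pvMkName w := by
  apply String.ext
  rw [toList_strReplace, hw, pvMkName]
  simp

lemma pvInner_spec (tail : String) (sl : Int) (path : String) :
    pvInner tail sl path =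
      (let x := pvSpecW tail.toList.reverse (decide (sl ≠ -1))
       (x.1, x.2.1, x.2.2, path)) := by
  unfold pvInner pvSpecW
  set w := tail.toList.reverse with hw
  have hwrev : tail.toList = w.reverse := by rw [hw, List.reverse_reverse]
  have hname : (if sl ≠ -1 then some (PySem.Str.replace tail "_" " ") else none)
      = (if decide (sl ≠ -1) = true then some (pvMkName w) else none) := by
    by_cases hsl : sl = -1 <;> simp [hsl, pvReplaceName tail w hwrev]
  have hj1 : max (PySem.Str.rfind tail ".") (PySem.Str.rfind tail "_")
      = (w.length : Int) - 1 - ((w.takeWhile pvNd).length : Int) := by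
    rw [pvRfind_delims_str, hwrev]
    simp [hw]
  cases hu1 : w.dropWhile pvNd with
  | nil =>
    have ht1 : w.takeWhile pvNd = w := pvTakeWhile_eq_self pvNd w hu1
    have hmax : max (PySem.Str.rfind tail ".") (PySem.Str.rfind tail "_") = -1 := by
      rw [hj1, ht1]; omega
    simp only [hmax, hu1]
    simp [hname]
  | cons c u1 =>
    have hsplitw : w = w.takeWhile pvNd ++ c :: u1 := pvSplit_dropWhile pvNd w c u1 hu1
    set t1 := w.takeWhile pvNd with ht1
    have hlenw : w.length = t1.length + 1 + u1.length := by
      rw [hsplitw]; simp; omega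
    have hmax : max (PySem.Str.rfind tail ".") (PySem.Str.rfind tail "_")
        = (u1.length : Int) := by
      rw [hj1]; omega
    have hne : ¬ ((u1.length : Int) = -1) := by omega
    have htail_list : tail.toList = u1.reverse ++ c :: t1.reverse := by
      rw [hwrev, hsplitw, pvRev_decomp]
    have hextS : PySem.Str.slice tail (some ((u1.length : Int) + 1)) none
        = String.ofList t1.reverse := by
      apply String.ext
      rw [pvSliceFrom_toList, htail_list, pvDrop_at]
      simp
    have hheadL : (PySem.Str.slice tail none (some (u1.length : Int))).toList = u1.reverse := by
      rw [pvSliceTo_toList, htail_list, pvTake_at]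
    have hj2 : max (PySem.Str.rfind (PySem.Str.slice tail none (some (u1.length : Int))) ".")
          (PySem.Str.rfind (PySem.Str.slice tail none (some (u1.length : Int))) "_")
        = (u1.length : Int) - 1 - ((u1.takeWhile pvNd).length : Int) := by
      rw [pvRfind_delims_str, hheadL]
      simp
    simp only [hmax, if_neg hne]
    cases hu2 : u1.dropWhile pvNd with
    | nil =>
      have ht2 : u1.takeWhile pvNd = u1 := pvTakeWhile_eq_self pvNd u1 hu2
      have hmax2 : max (PySem.Str.rfind (PySem.Str.slice tail none (some (u1.length : Int))) ".")
            (PySem.Str.rfind (PySem.Str.slice tail none (some (u1.length : Int))) "_") = -1 := by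
        rw [hj2, ht2]; omega
      have hnm : (if sl ≠ -1
            then some (PySem.Str.replace (PySem.Str.slice tail none (some (u1.length : Int))) "_" " ")
            else none)
          = (if decide (sl ≠ -1) = true then some (pvMkName u1) else none) := by
        by_cases hsl : sl = -1 <;>
          simp [hsl, pvReplaceName (PySem.Str.slice tail none (some (u1.length : Int))) u1 hheadL]
      simp only [hmax2]
      simp [hnm, hextS]
    | cons d u2 =>
      have hsplitu : u1 = u1.takeWhile pvNd ++ d :: u2 := pvSplit_dropWhile pvNd u1 d u2 hu2
      set t2 := u1.takeWhile pvNd with ht2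
      have hlenu : u1.length = t2.length + 1 + u2.length := by
        rw [hsplitu]; simp; omega
      have hmax2 : max (PySem.Str.rfind (PySem.Str.slice tail none (some (u1.length : Int))) ".")
            (PySem.Str.rfind (PySem.Str.slice tail none (some (u1.length : Int))) "_")
          = (u2.length : Int) := by
        rw [hj2]; omega
      have hne2 : ¬ ((u2.length : Int) = -1) := by omega
      have hheadL' : (PySem.Str.slice tail none (some (u1.length : Int))).toList
          = u2.reverse ++ d :: t2.reverse := by
        rw [hheadL, hsplitu, pvRev_decomp]
      have hyearS : PySem.Str.slice (PySem.Str.slice tail none (some (u1.length : Int)))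
            (some ((u2.length : Int) + 1)) none = String.ofList t2.reverse := by
        apply String.ext
        rw [pvSliceFrom_toList, hheadL', pvDrop_at]
        simp
      have hrestL : (PySem.Str.slice (PySem.Str.slice tail none (some (u1.length : Int)))
            none (some (u2.length : Int))).toList = u2.reverse := by
        rw [pvSliceTo_toList, hheadL', pvTake_at]
      have hnm : (if sl ≠ -1
            then some (PySem.Str.replace (PySem.Str.slice (PySem.Str.slice tail none
              (some (u1.length : Int))) none (some (u2.length : Int))) "_" " ")
            else none)
          = (if decide (sl ≠ -1) = true then some (pvMkName u2) else none) := by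
        by_cases hsl : sl = -1 <;>
          simp [hsl, pvReplaceName _ u2 hrestL]
      simp only [hmax2, if_neg hne2]
      simp [hnm, hextS, hyearS]

-- B computes pvSpec of the reversed character list
lemma altB_eq_pvSpec (v : String) :
    parse_video_name_alt v =
      ((pvSpec v.toList.reverse).1, (pvSpec v.toList.reverse).2.1,
        (pvSpec v.toList.reverse).2.2, v) := by
  rw [pvAlt_def, pvInner_spec]
  have hsl : PySem.Str.rfind v "/"
      = (v.toList.length : Int) - 1 - ((v.toList.reverse.takeWhile pvNs).length : Int) := by
    rw [PySem.Str.rfind_eq, show ("/" : String).toList = ['/'] from rfl, pvRfind_single]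
    rfl
  cases hr0 : v.toList.reverse.dropWhile pvNs with
  | nil =>
    have hall : v.toList.reverse.takeWhile pvNs = v.toList.reverse :=
      pvTakeWhile_eq_self pvNs _ hr0
    have hslv : PySem.Str.rfind v "/" = -1 := by
      rw [hsl, hall]; simp
    have htail : (PySem.Str.slice v (some (PySem.Str.rfind v "/" + 1)) none).toList
        = v.toList := by
      rw [hslv, PySem.Str.toList_slice, PySem.Chars.slice_eq_listSlice,
        show (-1 : Int) + 1 = ((0 : Nat) : Int) from by norm_num,
        PySem.List.slice_from_natCast, List.drop_zero]
    have hwmem : ∀ x ∈ v.toList.reverse, pvNs x = true := by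
      rw [List.dropWhile_eq_nil_iff] at hr0
      exact hr0
    have hspec : pvSpec v.toList.reverse = pvSpecW v.toList.reverse false := by
      have := pvSpec_decomp v.toList.reverse [] hwmem (Or.inl rfl)
      simpa using this
    rw [hspec, hslv]
    have hrev : (PySem.Str.slice v (some ((-1 : Int) + 1)) none).toList.reverse
        = v.toList.reverse := by
      rw [show ((-1 : Int) + 1) = (PySem.Str.rfind v "/" + 1) from by rw [hslv], htail]
    rw [hrev]
    norm_num
  | cons s0 rs =>
    have hs0 : s0 = '/' := by
      have := pvHead_dropWhile pvNs _ s0 rs hr0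
      simpa [pvNs] using this
    subst hs0
    have hsplit : v.toList.reverse = v.toList.reverse.takeWhile pvNs ++ '/' :: rs :=
      pvSplit_dropWhile pvNs _ '/' rs hr0
    set w := v.toList.reverse.takeWhile pvNs with hwdef
    have hwmem : ∀ x ∈ w, pvNs x = true := fun x hx => List.mem_takeWhile_imp hx
    have hlen : v.toList.length = w.length + 1 + rs.length := by
      have h := congrArg List.length hsplit
      simp only [List.length_reverse, List.length_append, List.length_cons] at h
      omega
    have hslv : PySem.Str.rfind v "/" = (rs.length : Int) := by
      rw [hsl]
      omega
    have hvlist : v.toList = rs.reverse ++ '/' :: w.reverse := by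
      conv_lhs => rw [← List.reverse_reverse v.toList]
      rw [hsplit, pvRev_decomp]
    have htail : (PySem.Str.slice v (some (PySem.Str.rfind v "/" + 1)) none).toList
        = w.reverse := by
      rw [hslv, pvSliceFrom_toList, hvlist, pvDrop_at]
    have hspec : pvSpec v.toList.reverse = pvSpecW w true := by
      rw [hsplit]
      have := pvSpec_decomp w ('/' :: rs) hwmem (Or.inr ⟨rs, rfl⟩)
      simpa using this
    have hnz : ¬ (PySem.Chars.rfind v.toList ['/'] = -1) := by
      have h : PySem.Str.rfind v "/" = PySem.Chars.rfind v.toList ['/'] := by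
        rw [PySem.Str.rfind_eq]; rfl
      rw [← h, hslv]
      omega
    rw [hspec, htail]
    simp [hnz]

-- ===== VERDICT (by name: the statement is the Claim_ definition above) =====
theorem parse_video_name_spec : Claim_equal_parse_video_name := by
  intro v _
  unfold Spec_parse_video_name
  rw [altB_eq_pvSpec]
  show (let r := pvLoop v.toList.reverse none none none true []
        (r.1, r.2.1, r.2.2, v)) = _
  rw [pvLoop_eq_pvSpec]
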